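-- pv_equiv track=rewrite | github.com/VedaangNarkhede/AI-LabReport-StrawHatPirrates | Lab4/bonus/raag.py | score_melody
-- ===== SOURCE A (Python) =====
-- from typing import List
--
-- RAAG_ASC = ['C', 'C#', 'E', 'F', 'G', 'G#', 'B']
--
-- RAAG_DESC = ['C', 'B', 'G#', 'G', 'F', 'E', 'C#']
--
-- def score_melody(melody: List[str]) -> int:
--     score = 0
--     la, ld = len(RAAG_ASC), len(RAAG_DESC)
--
--     for i in range(len(melody) - ld + 1):
--         if melody[i:i + ld] == RAAG_DESC:
--             score += 10
--         for j in range(2, ld):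
--             if melody[i:i + j] == RAAG_DESC[:j]:
--                 score += j
--
--     for i in range(len(melody) - la + 1):
--         if melody[i:i + la] == RAAG_ASC:
--             score += 10
--         for j in range(2, la):
--             if melody[i:i + j] == RAAG_ASC[:j]:
--                 score += j
--
--     return score
-- ===== SOURCE B (Python) =====
-- from typing import List
--
-- RAAG_ASC = ['C', 'C#', 'E', 'F', 'G', 'G#', 'B']
--
-- RAAG_DESC = ['C', 'B', 'G#', 'G', 'F', 'E', 'C#']
--
-- def _lcp(xs: List[str], pat: List[str]) -> int:
--     # longest common prefix length, one element-by-element pass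
--     L = 0
--     for a, b in zip(xs, pat):
--         if a != b:
--             break
--         L += 1
--     return L
--
-- def _pattern_score(melody: List[str], pattern: List[str]) -> int:
--     n = len(pattern)
--     total = 0
--     for i in range(len(melody) - n + 1):
--         L = _lcp(melody[i:], pattern)
--         m = min(L, n - 1)
--         if m >= 2:
--             total += m * (m + 1) // 2 - 1   # sum of 2..m, closed form
--         if L == n:
--             total += 10
--     return total
--
-- def score_melody(melody: List[str]) -> int:
--     return _pattern_score(melody, RAAG_DESC) + _pattern_score(melody, RAAG_ASC)
-- ===== Notes on version B (the rewrite author's own statement) =====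
-- stated objective: alternative
-- what changed: Per position B computes the longest-common-prefix length with the pattern in one element-wise scan and derives the score from it by a closed-form triangular sum (m*(m+1)//2-1, plus 10 on a full match), replacing A's six growing-slice comparisons per position.
import Mathlib
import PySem

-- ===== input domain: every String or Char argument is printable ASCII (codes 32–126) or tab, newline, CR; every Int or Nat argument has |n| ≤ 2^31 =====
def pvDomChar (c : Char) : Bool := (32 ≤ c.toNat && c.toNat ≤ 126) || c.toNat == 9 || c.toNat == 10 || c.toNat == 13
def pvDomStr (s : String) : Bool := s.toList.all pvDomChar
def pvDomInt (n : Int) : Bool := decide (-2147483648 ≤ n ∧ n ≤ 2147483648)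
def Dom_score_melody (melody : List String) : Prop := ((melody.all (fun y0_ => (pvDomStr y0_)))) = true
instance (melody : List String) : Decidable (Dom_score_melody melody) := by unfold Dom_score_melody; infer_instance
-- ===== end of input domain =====

-- B scores each position from one longest-common-prefix scan plus a closed-form triangular sum,
-- instead of A's six growing-slice comparisons per position (alternative decomposition).


-- ===== PORT A =====
def RAAG_ASC : List String := ["C", "C#", "E", "F", "G", "G#", "B"]
def RAAG_DESC : List String := ["C", "B", "G#", "G", "F", "E", "C#"]

def score_melody (melody : List String) : Int :=
  let score : Int := 0
  let la : Int := (RAAG_ASC.length : Int)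
  let ld : Int := (RAAG_DESC.length : Int)
  let score := (PySem.List.pyRange 0 ((melody.length : Int) - ld + 1) 1).foldl
    (fun score i =>
      let score := if PySem.List.slice melody (some i) (some (i + ld)) = RAAG_DESC then score + 10 else score
      (PySem.List.pyRange 2 ld 1).foldl
        (fun score j =>
          if PySem.List.slice melody (some i) (some (i + j)) = PySem.List.slice RAAG_DESC none (some j)
          then score + j else score) score) score
  let score := (PySem.List.pyRange 0 ((melody.length : Int) - la + 1) 1).foldl
    (fun score i =>
      let score := if PySem.List.slice melody (some i) (some (i + la)) = RAAG_ASC then score + 10 else score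
      (PySem.List.pyRange 2 la 1).foldl
        (fun score j =>
          if PySem.List.slice melody (some i) (some (i + j)) = PySem.List.slice RAAG_ASC none (some j)
          then score + j else score) score) score
  score

-- ===== PORT B =====
-- longest common prefix length, one element-by-element pass (the zip loop of Source B)
def pvLcp : List String → List String → Nat
  | x :: xs, y :: ys => if x = y then pvLcp xs ys + 1 else 0
  | _, _ => 0

def pvPatternScore (melody pattern : List String) : Int :=
  let n : Int := (pattern.length : Int)
  (PySem.List.pyRange 0 ((melody.length : Int) - n + 1) 1).foldl
    (fun total i =>
      let L : Int := (pvLcp (PySem.List.slice melody (some i) none) pattern : Int)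
      let m : Int := min L (n - 1)
      let total := if 2 ≤ m then total + (PySem.Int.floordiv (m * (m + 1)) 2 - 1) else total
      if L = n then total + 10 else total) 0

def score_melody_alt (melody : List String) : Int :=
  pvPatternScore melody RAAG_DESC + pvPatternScore melody RAAG_ASC

-- ===== PRECONDITION & SPEC =====
def Spec_score_melody (melody : List String) (out : Int) : Prop := out = score_melody_alt melody
instance (melody : List String) (out : Int) : Decidable (Spec_score_melody melody out) := by unfold Spec_score_melody; infer_instance

-- ===== CLAIM (what is proved, stated in full; the proofs are below) =====
def Claim_equal_score_melody : Prop := ∀ (melody : List String), Dom_score_melody melody → Spec_score_melody melody (score_melody melody)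

-- ===== LEMMAS AND PROOFS =====

-- A's per-position step, for a fixed length-7 pattern
def pvStepA (melody pat : List String) (acc : Int) (i : Int) : Int :=
  let acc := if PySem.List.slice melody (some i) (some (i + 7)) = pat then acc + 10 else acc
  (PySem.List.pyRange 2 7 1).foldl
    (fun acc j =>
      if PySem.List.slice melody (some i) (some (i + j)) = PySem.List.slice pat none (some j)
      then acc + j else acc) acc

-- B's per-position step, for a fixed length-7 pattern
def pvStepB (melody pat : List String) (acc : Int) (i : Int) : Int :=
  let L : Int := (pvLcp (PySem.List.slice melody (some i) none) pat : Int)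
  let m : Int := min L 6
  let acc := if 2 ≤ m then acc + (PySem.Int.floordiv (m * (m + 1)) 2 - 1) else acc
  if L = 7 then acc + 10 else acc

theorem pvLcp_le (xs ys : List String) : pvLcp xs ys ≤ ys.length := by
  induction xs generalizing ys with
  | nil => cases ys <;> simp [pvLcp]
  | cons x xs ih =>
    cases ys with
    | nil => simp [pvLcp]
    | cons y ys =>
      simp only [pvLcp, List.length_cons]
      split
      · exact Nat.succ_le_succ (ih ys)
      · exact Nat.zero_le _

theorem pvTake_eq_iff (xs ys : List String) (j : Nat)
    (hx : j ≤ xs.length) (hy : j ≤ ys.length) :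
    xs.take j = ys.take j ↔ j ≤ pvLcp xs ys := by
  induction j generalizing xs ys with
  | zero => simp
  | succ j ih =>
    cases xs with
    | nil => simp at hx
    | cons x xs =>
      cases ys with
      | nil => simp at hy
      | cons y ys =>
        simp only [List.take_succ_cons, List.cons.injEq, pvLcp]
        by_cases hxy : x = y
        · rw [if_pos hxy]
          simp only [hxy, true_and]
          rw [ih xs ys (by simpa using hx) (by simpa using hy)]
          omega
        · rw [if_neg hxy]
          simp [hxy]

theorem pvFoldl_shift (f : Int → Int → Int) (h : ∀ a b x, f (a + b) x = a + f b x)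
    (l : List Int) : ∀ s : Int, l.foldl f s = s + l.foldl f 0 := by
  induction l with
  | nil => intro s; simp
  | cons x l ih =>
    intro s
    have hs : f s x = s + f 0 x := by
      have := h s 0 x; simpa using this
    simp only [List.foldl_cons, hs, ih (s + f 0 x), ih (f 0 x)]
    ring

theorem pvRange27 : PySem.List.pyRange 2 7 1 = [2, 3, 4, 5, 6] := by decide

theorem pvStepA_shift (melody pat : List String) (a b x : Int) :
    pvStepA melody pat (a + b) x = a + pvStepA melody pat b x := by
  simp only [pvStepA, pvRange27, List.foldl_cons, List.foldl_nil]
  split_ifs <;> ring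

theorem pvStep_eq (melody pat : List String) (hp : pat.length = 7)
    (acc i : Int) (h0 : 0 ≤ i) (hi : i + 7 ≤ (melody.length : Int)) :
    pvStepA melody pat acc i = pvStepB melody pat acc i := by
  have hxslen : 7 ≤ (melody.drop i.toNat).length := by
    simp only [List.length_drop]; omega
  have hslice : ∀ j : Int, 0 ≤ j →
      PySem.List.slice melody (some i) (some (i + j)) = (melody.drop i.toNat).take j.toNat := by
    intro j hj
    rw [PySem.List.slice_toNat melody h0 (by omega)]
    congr 1
    omega
  set xs := melody.drop i.toNat with hxs
  set L := pvLcp xs pat with hLdef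
  have hL7 : L ≤ 7 := by rw [hLdef, ← hp]; exact pvLcp_le xs pat
  have hcond : ∀ j : Nat, j ≤ 7 →
      ((PySem.List.slice melody (some i) (some (i + (j : Int))) = pat.take j) ↔ j ≤ L) := by
    intro j hj
    rw [hslice (j : Int) (by omega)]
    simp only [Int.toNat_natCast]
    exact pvTake_eq_iff xs pat j (by omega) (by omega)
  have hfull : (PySem.List.slice melody (some i) (some (i + 7)) = pat) ↔ L = 7 := by
    have h7 : (PySem.List.slice melody (some i) (some (i + ((7:Nat) : Int))) = pat.take 7) ↔ 7 ≤ L :=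
      hcond 7 (le_refl _)
    norm_num at h7
    rw [show pat.take 7 = pat from by rw [← hp]; exact List.take_length] at h7
    rw [h7]; omega
  have hto : ∀ j : Nat, PySem.List.slice pat none (some (j : Int)) = pat.take j := by
    intro j
    rw [PySem.List.slice_to pat (by omega : (0:Int) ≤ (j : Int))]
    simp
  have hfrom : PySem.List.slice melody (some i) none = xs := by
    rw [PySem.List.slice_from melody h0]
  simp only [pvStepA, pvStepB, pvRange27, List.foldl_cons, List.foldl_nil, hfrom, ← hLdef]
  rw [show (2 : Int) = ((2 : Nat) : Int) from rfl, show (3 : Int) = ((3 : Nat) : Int) from rfl,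
      show (4 : Int) = ((4 : Nat) : Int) from rfl, show (5 : Int) = ((5 : Nat) : Int) from rfl,
      show (6 : Int) = ((6 : Nat) : Int) from rfl]
  rw [hto 2, hto 3, hto 4, hto 5, hto 6]
  simp only [hfull, hcond 2 (by omega), hcond 3 (by omega), hcond 4 (by omega),
    hcond 5 (by omega), hcond 6 (by omega)]
  clear_value L
  interval_cases L <;> norm_num [PySem.Int.floordiv, Int.fdiv] <;> ring

theorem pvBlock_eq (melody pat : List String) (hp : pat.length = 7) :
    (PySem.List.pyRange 0 ((melody.length : Int) - 7 + 1) 1).foldl (pvStepA melody pat) 0 =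
    pvPatternScore melody pat := by
  unfold pvPatternScore
  rw [hp]
  apply PySem.List.foldl_congr_mem
  intro acc x hx
  rw [PySem.List.mem_pyRange_one] at hx
  rw [pvStep_eq melody pat hp acc x hx.1 (by omega)]
  rfl

-- ===== VERDICT (by name: the statement is the Claim_ definition above) =====
theorem score_melody_spec : Claim_equal_score_melody := by
  intro melody _
  unfold Spec_score_melody score_melody score_melody_alt
  show (PySem.List.pyRange 0 ((melody.length : Int) - 7 + 1) 1).foldl (pvStepA melody RAAG_ASC)
      ((PySem.List.pyRange 0 ((melody.length : Int) - 7 + 1) 1).foldl (pvStepA melody RAAG_DESC) 0)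
      = pvPatternScore melody RAAG_DESC + pvPatternScore melody RAAG_ASC
  rw [pvFoldl_shift (pvStepA melody RAAG_ASC) (pvStepA_shift melody RAAG_ASC) _ _,
      pvBlock_eq melody RAAG_DESC rfl, pvBlock_eq melody RAAG_ASC rfl]
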